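-- pv_equiv track=rewrite | github.com/Awesome20225266/ptw-permit-system | backend/app/services/scb_service.py | _sanitize_table_name
-- ===== SOURCE A (Python) =====
-- def _sanitize_table_name(site_name: str) -> str:
--     s = str(site_name).strip().lower()
--     out: list[str] = []
--     prev_us = False
--     for ch in s:
--         if ch.isalnum():
--             out.append(ch)
--             prev_us = False
--         else:
--             if not prev_us:
--                 out.append("_")
--                 prev_us = True
--     return "".join(out).strip("_") or s
-- ===== SOURCE B (Python) =====
-- def _sanitize_table_name(site_name: str) -> str:
--     s = str(site_name).strip().lower()
--     tokens = []
--     i = 0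
--     n = len(s)
--     while i < n:
--         if s[i].isalnum():
--             j = i + 1
--             while j < n and s[j].isalnum():
--                 j += 1
--             tokens.append(s[i:j])
--             i = j
--         else:
--             i += 1
--     return "_".join(tokens) or s
-- ===== Notes on version B (the rewrite author's own statement) =====
-- stated objective: alternative
-- what changed: Replaced A's per-character state machine (emit characters, deduplicate separators with a prev_us flag, then strip the pads) by a two-pointer scanner that collects the maximal alphanumeric runs as tokens and joins them with single underscores.
import Mathlib
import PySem

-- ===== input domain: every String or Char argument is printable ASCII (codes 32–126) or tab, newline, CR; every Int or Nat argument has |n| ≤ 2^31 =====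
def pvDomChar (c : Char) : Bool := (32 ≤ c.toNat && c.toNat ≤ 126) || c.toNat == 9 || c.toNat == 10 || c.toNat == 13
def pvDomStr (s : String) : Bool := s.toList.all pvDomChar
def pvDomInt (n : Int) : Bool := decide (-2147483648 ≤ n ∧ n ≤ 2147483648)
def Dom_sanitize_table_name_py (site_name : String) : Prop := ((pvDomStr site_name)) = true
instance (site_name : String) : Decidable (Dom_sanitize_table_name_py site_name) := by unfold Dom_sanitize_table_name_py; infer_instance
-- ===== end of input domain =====

-- B replaces A's per-character underscore state machine (emit chars then strip the pads)
-- by a two-pointer token scanner that collects the maximal alphanumeric runs and joins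
-- them with single underscores (objective: alternative decomposition, same linear cost).

-- ===== PORT A =====
-- literal port of A: strip+lower, one pass emitting chars / deduplicated underscores, strip them, `or s`
-- A's loop body
def pvStepA (acc : List Char × Bool) (ch : Char) : List Char × Bool :=
  if PySem.Chars.isalnum ch then (acc.1 ++ [ch], false)
  else if !acc.2 then (acc.1 ++ ['_'], true) else acc

def sanitize_table_name_py (site_name : String) : String :=
  let s := PySem.Chars.lower (PySem.Chars.strip site_name.toList)
  let st := s.foldl pvStepA (([] : List Char), false)
  let res := PySem.Chars.stripChars st.1 ['_']
  if res.isEmpty then String.ofList s else String.ofList res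

-- ===== PORT B =====
-- B's token scanner: the inner `while j < n and s[j].isalnum()` advance is takeWhile/dropWhile
def pvTokens : List Char → List (List Char)
  | [] => []
  | c :: r =>
    if PySem.Chars.isalnum c then
      (c :: r.takeWhile PySem.Chars.isalnum) :: pvTokens (r.dropWhile PySem.Chars.isalnum)
    else pvTokens r
termination_by cs => cs.length
decreasing_by
  · exact Nat.lt_succ_of_le (List.length_dropWhile_le _ _)
  · simp

def sanitize_table_name_py_alt (site_name : String) : String :=
  let s := PySem.Chars.lower (PySem.Chars.strip site_name.toList)
  let t := PySem.Chars.join ['_'] (pvTokens s)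
  if t.isEmpty then String.ofList s else String.ofList t

-- ===== PRECONDITION & SPEC =====
def Spec_sanitize_table_name_py (site_name : String) (out : String) : Prop := out = sanitize_table_name_py_alt site_name
instance (site_name : String) (out : String) : Decidable (Spec_sanitize_table_name_py site_name out) := by unfold Spec_sanitize_table_name_py; infer_instance

-- ===== CLAIM (what is proved, stated in full; the proofs are below) =====
def Claim_equal_sanitize_table_name_py : Prop := ∀ (site_name : String), Dom_sanitize_table_name_py site_name → Spec_sanitize_table_name_py site_name (sanitize_table_name_py site_name)

-- ===== LEMMAS AND PROOFS =====

-- recursive form of A's loop body (emitted characters for a given prev_us flag)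
def pvEmit : List Char → Bool → List Char
  | [], _ => []
  | c :: r, prev =>
    if PySem.Chars.isalnum c then c :: pvEmit r false
    else if !prev then '_' :: pvEmit r true else pvEmit r true

-- A's foldl accumulates pvEmit onto the accumulator
theorem pvFold_eq_emit (cs : List Char) (acc : List Char) (prev : Bool) :
    (cs.foldl pvStepA (acc, prev)).1
    = acc ++ pvEmit cs prev := by
  induction cs generalizing acc prev with
  | nil => simp [pvEmit]
  | cons c r ih =>
    rw [List.foldl_cons]
    by_cases h : PySem.Chars.isalnum c = true
    · rw [show pvStepA (acc, prev) c = (acc ++ [c], false) by simp [pvStepA, h], ih]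
      simp [pvEmit, h]
    · cases prev
      · rw [show pvStepA (acc, false) c = (acc ++ ['_'], true) by simp [pvStepA, h], ih]
        simp [pvEmit, h]
      · rw [show pvStepA (acc, true) c = (acc, true) by simp [pvStepA, h], ih]
        simp [pvEmit, h]

theorem pvEmit_alnum_prefix (a r : List Char) (h : ∀ x ∈ a, PySem.Chars.isalnum x = true) :
    pvEmit (a ++ r) false = a ++ pvEmit r false := by
  induction a with
  | nil => simp
  | cons c t ih =>
    have hc := h c (by simp)
    simp [pvEmit, hc, ih (fun x hx => h x (by simp [hx]))]

-- every token is nonempty and all-alphanumeric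
theorem pvTokens_mem (cs : List Char) :
    ∀ g ∈ pvTokens cs, g ≠ [] ∧ ∀ x ∈ g, PySem.Chars.isalnum x = true := by
  induction cs using pvTokens.induct with
  | case1 => simp [pvTokens]
  | case2 c r h ih =>
    intro g hg
    rw [pvTokens, if_pos h] at hg
    rcases List.mem_cons.mp hg with rfl | hg
    · refine ⟨by simp, ?_⟩
      intro x hx
      rcases List.mem_cons.mp hx with rfl | hx
      · exact h
      · exact List.mem_takeWhile_imp hx
    · exact ih g hg
  | case3 c r h ih =>
    intro g hg
    rw [pvTokens, if_neg h] at hg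
    exact ih g hg

theorem pvTokens_nil_all (cs : List Char) (h : pvTokens cs = []) :
    ∀ x ∈ cs, PySem.Chars.isalnum x = false := by
  induction cs with
  | nil => simp
  | cons c r ih =>
    by_cases hc : PySem.Chars.isalnum c = true
    · rw [pvTokens, if_pos hc] at h; simp at h
    · rw [pvTokens, if_neg hc] at h
      intro x hx
      rcases List.mem_cons.mp hx with rfl | hx
      · simpa using hc
      · exact ih h x hx

-- join over a cons
theorem pvJoin_cons (x : List Char) (L : List (List Char)) :
    PySem.Chars.join ['_'] (x :: L)
      = x ++ (if L = [] then [] else '_' :: PySem.Chars.join ['_'] L) := by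
  cases L with
  | nil => simp [PySem.Chars.join, List.intercalate]
  | cons y M => simp [PySem.Chars.join, List.intercalate, List.intersperse]

def pvPadL (cs : List Char) : List Char :=
  match cs with
  | [] => []
  | c :: _ => if PySem.Chars.isalnum c then [] else ['_']

def pvPadR (cs : List Char) : List Char :=
  if PySem.Chars.join ['_'] (pvTokens cs) = [] then []
  else match cs.getLast? with
    | none => []
    | some c => if PySem.Chars.isalnum c then [] else ['_']

theorem pvJoin_tokens_ne_nil (cs : List Char) (h : pvTokens cs ≠ []) :
    PySem.Chars.join ['_'] (pvTokens cs) ≠ [] := by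
  obtain ⟨g, L, hgl⟩ := List.exists_cons_of_ne_nil h
  have hg := (pvTokens_mem cs g (by rw [hgl]; simp)).1
  rw [hgl, pvJoin_cons]
  intro hcontra
  exact hg (by simpa using (List.append_eq_nil_iff.mp hcontra).1)

theorem pvGetLast?_of_suffix {l l' : List Char} (h : l' <:+ l) (hne : l' ≠ []) :
    l.getLast? = l'.getLast? := by
  obtain ⟨t, rfl⟩ := h
  exact List.getLast?_append_of_ne_nil _ hne

theorem pvJoin_nil : PySem.Chars.join ['_'] [] = [] := by
  simp [PySem.Chars.join, List.intercalate]

theorem pvTokens_ne_nil_of (cs : List Char) (h : pvTokens cs ≠ []) : cs ≠ [] := by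
  intro hcs; rw [hcs, pvTokens] at h; exact h rfl

theorem pvGetLast_alnum (cs : List Char) (hne : cs ≠ [])
    (hall : ∀ x ∈ cs, PySem.Chars.isalnum x = true) :
    cs.getLast? = some (cs.getLast hne) ∧ PySem.Chars.isalnum (cs.getLast hne) = true :=
  ⟨List.getLast?_eq_some_getLast hne, hall _ (List.getLast_mem hne)⟩

theorem pvDropWhile_head_false {p : Char → Bool} {l : List Char} {d : Char} {t : List Char}
    (hd : l.dropWhile p = d :: t) : p d = false := by
  induction l generalizing d t with
  | nil => simp at hd
  | cons a l' ih =>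
    rw [List.dropWhile_cons] at hd
    by_cases hpa : p a = true
    · rw [if_pos hpa] at hd; exact ih hd
    · rw [if_neg hpa] at hd
      obtain ⟨rfl, -⟩ := List.cons.inj hd
      simpa using hpa

-- the core structural lemma: A's emitted string is the token join with at most one pad each side
theorem pvShape (cs : List Char) :
    pvEmit cs false = pvPadL cs ++ PySem.Chars.join ['_'] (pvTokens cs) ++ pvPadR cs
    ∧ pvEmit cs true = PySem.Chars.join ['_'] (pvTokens cs) ++ pvPadR cs := by
  induction cs using pvTokens.induct with
  | case1 => simp [pvEmit, pvTokens, pvPadL, pvPadR]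
  | case2 c r h ih =>
    -- the alphanumeric run a = c :: takeWhile, remainder rest = dropWhile
    have hsplit : r.takeWhile PySem.Chars.isalnum ++ r.dropWhile PySem.Chars.isalnum = r :=
      List.takeWhile_append_dropWhile
    have htak : ∀ x ∈ r.takeWhile PySem.Chars.isalnum, PySem.Chars.isalnum x = true :=
      fun x hx => List.mem_takeWhile_imp hx
    have hemitr : pvEmit r false
        = r.takeWhile PySem.Chars.isalnum ++ pvEmit (r.dropWhile PySem.Chars.isalnum) false := by
      conv_lhs => rw [← hsplit]
      exact pvEmit_alnum_prefix _ _ htak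
    have htok : pvTokens (c :: r)
        = (c :: r.takeWhile PySem.Chars.isalnum) :: pvTokens (r.dropWhile PySem.Chars.isalnum) := by
      rw [pvTokens, if_pos h]
    have hgoal : c :: pvEmit r false
        = PySem.Chars.join ['_'] (pvTokens (c :: r)) ++ pvPadR (c :: r) := by
      rw [htok, pvJoin_cons, hemitr]
      by_cases hT : pvTokens (r.dropWhile PySem.Chars.isalnum) = []
      · -- no token after the first run
        rw [if_pos hT]
        have hjcr : (c :: r.takeWhile PySem.Chars.isalnum) ++ ([] : List Char) ≠ [] := by simp
        by_cases hrest : r.dropWhile PySem.Chars.isalnum = []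
        · -- the whole string is one alphanumeric run
          have hallcr : ∀ x ∈ c :: r, PySem.Chars.isalnum x = true := by
            intro x hx
            rcases List.mem_cons.mp hx with rfl | hx
            · exact h
            · rw [← hsplit, hrest] at hx; exact htak x (by simpa using hx)
          obtain ⟨hl?, hla⟩ := pvGetLast_alnum (c :: r) (by simp) hallcr
          rw [hrest, pvEmit, pvPadR, if_neg (by rw [htok, hT, pvJoin_cons]; simp), hl?]
          simp [hla]
        · -- trailing junk, all non-alphanumeric
          have hallnon : ∀ x ∈ r.dropWhile PySem.Chars.isalnum, PySem.Chars.isalnum x = false :=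
            pvTokens_nil_all _ hT
          have hsuf : r.dropWhile PySem.Chars.isalnum <:+ c :: r :=
            (List.dropWhile_suffix _).trans (List.suffix_cons c r)
          have hlast : (c :: r).getLast? = (r.dropWhile PySem.Chars.isalnum).getLast? :=
            pvGetLast?_of_suffix hsuf hrest
          have hlastv : (r.dropWhile PySem.Chars.isalnum).getLast?
              = some ((r.dropWhile PySem.Chars.isalnum).getLast hrest) :=
            List.getLast?_eq_some_getLast hrest
          have hlnon : PySem.Chars.isalnum ((r.dropWhile PySem.Chars.isalnum).getLast hrest) = false :=
            hallnon _ (List.getLast_mem hrest)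
          have hpadLrest : pvPadL (r.dropWhile PySem.Chars.isalnum) = ['_'] := by
            obtain ⟨d, t, hd⟩ := List.exists_cons_of_ne_nil hrest
            have hdn : PySem.Chars.isalnum d = false := hallnon d (by rw [hd]; simp)
            rw [hd, pvPadL]; simp [hdn]
          have := ih.1
          rw [hpadLrest, pvPadR, if_pos (by rw [hT, pvJoin_nil]), hT, pvJoin_nil] at this
          rw [this, pvPadR, if_neg (by rw [htok, hT, pvJoin_cons]; simp), hlast, hlastv]
          simp [hlnon]
      · -- at least one token after the first run
        rw [if_neg hT]
        have hrest : r.dropWhile PySem.Chars.isalnum ≠ [] := pvTokens_ne_nil_of _ hT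
        have hJ : PySem.Chars.join ['_'] (pvTokens (r.dropWhile PySem.Chars.isalnum)) ≠ [] :=
          pvJoin_tokens_ne_nil _ hT
        have hpadLrest : pvPadL (r.dropWhile PySem.Chars.isalnum) = ['_'] := by
          obtain ⟨d, t, hd⟩ := List.exists_cons_of_ne_nil hrest
          have hdn : PySem.Chars.isalnum d = false := pvDropWhile_head_false hd
          rw [hd, pvPadL]; simp [hdn]
        have hsuf : r.dropWhile PySem.Chars.isalnum <:+ c :: r :=
          (List.dropWhile_suffix _).trans (List.suffix_cons c r)
        have hlast : (c :: r).getLast? = (r.dropWhile PySem.Chars.isalnum).getLast? :=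
          pvGetLast?_of_suffix hsuf hrest
        have hpadR : pvPadR (c :: r) = pvPadR (r.dropWhile PySem.Chars.isalnum) := by
          rw [pvPadR, pvPadR, hlast,
            if_neg (by rw [htok, pvJoin_cons, if_neg hT]; simp), if_neg hJ]
        have := ih.1
        rw [hpadLrest] at this
        rw [this, hpadR]
        simp
    constructor
    · rw [show pvEmit (c :: r) false = c :: pvEmit r false by rw [pvEmit, if_pos h], hgoal]
      rw [show pvPadL (c :: r) = [] by rw [pvPadL]; simp [h]]
      simp
    · rw [show pvEmit (c :: r) true = c :: pvEmit r false by rw [pvEmit, if_pos h], hgoal]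
  | case3 c r h ih =>
    have hb : PySem.Chars.isalnum c = false := by simpa using h
    have htok : pvTokens (c :: r) = pvTokens r := by rw [pvTokens, if_neg h]
    have hpadR : pvPadR (c :: r) = pvPadR r := by
      by_cases hJ : PySem.Chars.join ['_'] (pvTokens r) = []
      · rw [pvPadR, pvPadR, if_pos (by rw [htok]; exact hJ), if_pos hJ]
      · have hT : pvTokens r ≠ [] := by intro hc; rw [hc, pvJoin_nil] at hJ; exact hJ rfl
        have hr : r ≠ [] := pvTokens_ne_nil_of _ hT
        have hlast : (c :: r).getLast? = r.getLast? := by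
          rw [show c :: r = [c] ++ r by simp, List.getLast?_append_of_ne_nil _ hr]
        rw [pvPadR, pvPadR, hlast, if_neg (by rw [htok]; exact hJ), if_neg hJ]
    have hemit : pvEmit (c :: r) true = pvEmit r true := by rw [pvEmit, if_neg h]; simp
    have hemitf : pvEmit (c :: r) false = '_' :: pvEmit r true := by rw [pvEmit, if_neg h]; simp
    constructor
    · rw [hemitf, ih.2, htok, hpadR, show pvPadL (c :: r) = ['_'] by rw [pvPadL]; simp [hb]]
      simp
    · rw [hemit, ih.2, htok, hpadR]

theorem pvJoin_getLast (L : List (List Char))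
    (hL : ∀ g ∈ L, g ≠ [] ∧ ∀ x ∈ g, PySem.Chars.isalnum x = true) (hne : L ≠ []) :
    ∃ y, (PySem.Chars.join ['_'] L).getLast? = some y ∧ PySem.Chars.isalnum y = true := by
  induction L with
  | nil => exact absurd rfl hne
  | cons g M ih =>
    cases M with
    | nil =>
      obtain ⟨hg, hall⟩ := hL g (by simp)
      refine ⟨g.getLast hg, ?_, hall _ (List.getLast_mem hg)⟩
      rw [show PySem.Chars.join ['_'] [g] = g by simp [PySem.Chars.join, List.intercalate]]
      exact List.getLast?_eq_some_getLast hg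
    | cons g' M' =>
      obtain ⟨y, hy, hya⟩ := ih (fun x hx => hL x (by simp [hx])) (by simp)
      have hJne : PySem.Chars.join ['_'] (g' :: M') ≠ [] := by
        intro hc; rw [hc] at hy; simp at hy
      refine ⟨y, ?_, hya⟩
      rw [pvJoin_cons, if_neg (by simp)]
      rw [List.getLast?_append_of_ne_nil _ (l₂ := '_' :: PySem.Chars.join ['_'] (g' :: M')) (by simp)]
      rw [show '_' :: PySem.Chars.join ['_'] (g' :: M') = ['_'] ++ PySem.Chars.join ['_'] (g' :: M') by simp,
        List.getLast?_append_of_ne_nil _ hJne]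
      exact hy

theorem pvAlnum_not_us {x : Char} (hx : PySem.Chars.isalnum x = true) : x ≠ '_' := by
  intro hc; rw [hc] at hx; exact absurd hx (by decide)

theorem pvStrip_shape (cs : List Char) :
    PySem.Chars.stripChars (pvEmit cs false) ['_'] = PySem.Chars.join ['_'] (pvTokens cs) := by
  rw [(pvShape cs).1]
  by_cases hT : pvTokens cs = []
  · -- no tokens: the emitted string is [] or ['_'], both strip to []
    rw [hT, pvJoin_nil, pvPadR, if_pos (by rw [hT, pvJoin_nil])]
    cases cs with
    | nil => rw [pvPadL]; simp [PySem.Chars.stripChars]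
    | cons c r =>
      have hc : PySem.Chars.isalnum c = false := pvTokens_nil_all _ hT c (by simp)
      rw [pvPadL]; simp [hc, PySem.Chars.stripChars]
  · -- tokens present: join starts and ends with an alphanumeric character
    obtain ⟨g, L, hgl⟩ := List.exists_cons_of_ne_nil hT
    obtain ⟨hg, hgall⟩ := pvTokens_mem cs g (by rw [hgl]; simp)
    obtain ⟨x, g', hxg⟩ := List.exists_cons_of_ne_nil hg
    have hx : PySem.Chars.isalnum x = true := hgall x (by rw [hxg]; simp)
    obtain ⟨y, hy, hya⟩ := pvJoin_getLast (pvTokens cs) (pvTokens_mem cs) hT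
    have hhead : ∃ t, PySem.Chars.join ['_'] (pvTokens cs) = x :: t := by
      rw [hgl, pvJoin_cons, hxg]
      exact ⟨g' ++ (if L = [] then [] else '_' :: PySem.Chars.join ['_'] L), by simp⟩
    obtain ⟨t, hjt⟩ := hhead
    have hpadL : pvPadL cs = [] ∨ pvPadL cs = ['_'] := by
      cases cs with
      | nil => left; rfl
      | cons a b => rw [pvPadL]; by_cases ha : PySem.Chars.isalnum a = true <;> simp [ha]
    have hpadR : pvPadR cs = [] ∨ pvPadR cs = ['_'] := by
      rw [pvPadR]
      rcases cs.getLast? with _ | d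
      · by_cases hj : PySem.Chars.join ['_'] (pvTokens cs) = [] <;> simp [hj]
      · by_cases hj : PySem.Chars.join ['_'] (pvTokens cs) = [] <;>
          by_cases hd : PySem.Chars.isalnum d = true <;> simp [hj, hd]
    -- step 1: dropWhile removes pvPadL and stops at x
    have hstep1 : List.dropWhile (fun c => (['_'].contains c : Bool))
        (pvPadL cs ++ PySem.Chars.join ['_'] (pvTokens cs) ++ pvPadR cs)
        = PySem.Chars.join ['_'] (pvTokens cs) ++ pvPadR cs := by
      have hstop : List.dropWhile (fun c => (['_'].contains c : Bool))
          (PySem.Chars.join ['_'] (pvTokens cs) ++ pvPadR cs)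
          = PySem.Chars.join ['_'] (pvTokens cs) ++ pvPadR cs := by
        rw [hjt]
        simp [pvAlnum_not_us hx]
      rcases hpadL with hp | hp
      · rw [hp]; simpa using hstop
      · rw [hp, List.append_assoc, show (['_'] : List Char) ++ _ = '_' :: (PySem.Chars.join ['_'] (pvTokens cs) ++ pvPadR cs) by simp,
          List.dropWhile_cons]
        simpa using hstop
    -- step 2: the reversed tail strips pvPadR and stops at y
    have hJrev : ∃ t', (PySem.Chars.join ['_'] (pvTokens cs)).reverse = y :: t' := by
      have : (PySem.Chars.join ['_'] (pvTokens cs)).reverse.head? = some y := by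
        rw [List.head?_reverse]; exact hy
      cases hrev : (PySem.Chars.join ['_'] (pvTokens cs)).reverse with
      | nil => rw [hrev] at this; simp at this
      | cons a b => rw [hrev] at this; simp at this; exact ⟨b, by rw [this]⟩
    obtain ⟨t', ht'⟩ := hJrev
    have hstep2 : List.dropWhile (fun c => (['_'].contains c : Bool))
        (PySem.Chars.join ['_'] (pvTokens cs) ++ pvPadR cs).reverse
        = (PySem.Chars.join ['_'] (pvTokens cs)).reverse := by
      rw [List.reverse_append]
      have hstop : List.dropWhile (fun c => (['_'].contains c : Bool))
          (PySem.Chars.join ['_'] (pvTokens cs)).reverse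
          = (PySem.Chars.join ['_'] (pvTokens cs)).reverse := by
        rw [ht', List.dropWhile_cons]
        simp [pvAlnum_not_us hya]
      rcases hpadR with hp | hp
      · rw [hp]; simpa using hstop
      · rw [hp, show (['_'] : List Char).reverse = ['_'] by rfl,
          show (['_'] : List Char) ++ (PySem.Chars.join ['_'] (pvTokens cs)).reverse
            = '_' :: (PySem.Chars.join ['_'] (pvTokens cs)).reverse by simp,
          List.dropWhile_cons]
        simpa using hstop
    rw [PySem.Chars.stripChars, hstep1, hstep2, List.reverse_reverse]

-- ===== VERDICT (by name: the statement is the Claim_ definition above) =====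
theorem sanitize_table_name_py_spec : Claim_equal_sanitize_table_name_py := by
  intro site_name _
  unfold Spec_sanitize_table_name_py sanitize_table_name_py sanitize_table_name_py_alt
  simp only [pvFold_eq_emit, List.nil_append, pvStrip_shape]
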